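-- pv_equiv track=rewrite | github.com/HY-D1/textbook-pdf-helper | src/algl_pdf_helper/indexer.py | get_doc_alias
-- ===== SOURCE A (Python) =====
-- _DEFAULT_ALIASES: dict[str, str] = {
--     "SQL_Course_Textbook.pdf": "sql-textbook",
--     "sql-course-textbook.pdf": "sql-textbook",
-- }
--
-- def get_doc_alias(filename: str) -> str:
--     if filename in _DEFAULT_ALIASES:
--         return _DEFAULT_ALIASES[filename]
--
--     lower = filename.lower()
--     for k, v in _DEFAULT_ALIASES.items():
--         if k.lower() == lower:
--             return v
--
--     base = filename
--     if base.lower().endswith(".pdf"):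
--         base = base[:-4]
--
--     out = []
--     prev_dash = False
--     for ch in base.lower():
--         ok = ("a" <= ch <= "z") or ("0" <= ch <= "9")
--         if ok:
--             out.append(ch)
--             prev_dash = False
--         else:
--             if not prev_dash:
--                 out.append("-")
--                 prev_dash = True
--
--     alias = "".join(out).strip("-")
--     return alias or "pdf"
-- ===== SOURCE B (Python) =====
-- _DEFAULT_ALIASES: dict[str, str] = {
--     "SQL_Course_Textbook.pdf": "sql-textbook",
--     "sql-course-textbook.pdf": "sql-textbook",
-- }
--
-- def get_doc_alias(filename: str) -> str:
--     if filename in _DEFAULT_ALIASES: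
--         return _DEFAULT_ALIASES[filename]
--
--     lower = filename.lower()
--     for k, v in _DEFAULT_ALIASES.items():
--         if k.lower() == lower:
--             return v
--
--     base = lower[:-4] if lower.endswith(".pdf") else lower
--     words = "".join(ch if ch.isalnum() else " " for ch in base).split()
--     return "-".join(words) or "pdf"
-- ===== Notes on version B (the rewrite author's own statement) =====
-- stated objective: idiomatic
-- what changed: The hand-rolled prev_dash state machine plus dash-stripping is replaced by blanking non-alphanumeric characters and joining the whitespace-split words with dashes, which collapses runs and trims edge dashes for free.
import Mathlib
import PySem

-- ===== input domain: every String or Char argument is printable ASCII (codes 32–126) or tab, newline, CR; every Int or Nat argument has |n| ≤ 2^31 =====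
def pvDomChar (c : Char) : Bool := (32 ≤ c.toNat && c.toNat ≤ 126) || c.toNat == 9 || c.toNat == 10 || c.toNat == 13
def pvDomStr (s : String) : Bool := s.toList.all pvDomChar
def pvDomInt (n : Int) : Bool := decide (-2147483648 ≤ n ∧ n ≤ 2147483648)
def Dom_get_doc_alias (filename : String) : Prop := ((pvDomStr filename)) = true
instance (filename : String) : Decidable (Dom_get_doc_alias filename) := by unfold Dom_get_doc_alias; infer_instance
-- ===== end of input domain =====

-- B replaces A's prev_dash state machine + strip('-') by blanking non-alphanumerics and using split()/'-'.join() (idiomatic; same cost).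

-- ===== PORT A =====
-- the module-level _DEFAULT_ALIASES dict (shared context of both versions)
def pvAliases : PySem.Dict String String :=
  PySem.Dict.ofList [("SQL_Course_Textbook.pdf", "sql-textbook"), ("sql-course-textbook.pdf", "sql-textbook")]

-- strings are tracked as char lists (PySem.Chars) per the PySem guidance; "".join(out) is the accumulated list itself
def get_doc_alias (filename : String) : String :=
  match PySem.Dict.get? pvAliases filename with
  | some v => v
  | none =>
    let lower := PySem.Chars.lower filename.toList
    match List.find? (fun kv => PySem.Chars.lower kv.1.toList == lower) pvAliases.items with
    | some kv => kv.2
    | none =>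
      let base := filename.toList
      let base := if PySem.Chars.endswith (PySem.Chars.lower base) ".pdf".toList
                  then PySem.List.slice base none (some (-4)) else base
      let out := (PySem.Chars.lower base).foldl
        (fun (st : List Char × Bool) (ch : Char) =>
          if (decide ('a' ≤ ch) && decide (ch ≤ 'z')) || (decide ('0' ≤ ch) && decide (ch ≤ '9')) then
            (st.1 ++ [ch], false)
          else if st.2 then st
          else (st.1 ++ ['-'], true)) ([], false)
      let aliasv := PySem.Chars.stripChars out.1 ['-']
      if aliasv.isEmpty then "pdf" else String.ofList aliasv

-- ===== PORT B =====
def get_doc_alias_alt (filename : String) : String :=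
  match PySem.Dict.get? pvAliases filename with
  | some v => v
  | none =>
    let lower := PySem.Chars.lower filename.toList
    match List.find? (fun kv => PySem.Chars.lower kv.1.toList == lower) pvAliases.items with
    | some kv => kv.2
    | none =>
      let base := if PySem.Chars.endswith lower ".pdf".toList
                  then PySem.List.slice lower none (some (-4)) else lower
      let blanked := base.map (fun ch => if PySem.Chars.isalnum ch then ch else ' ')
      let aliasv := PySem.Chars.join ['-'] (PySem.Chars.split₀ blanked)
      if aliasv.isEmpty then "pdf" else String.ofList aliasv

-- ===== PRECONDITION & SPEC =====
def Spec_get_doc_alias (filename : String) (out : String) : Prop := out = get_doc_alias_alt filename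
instance (filename : String) (out : String) : Decidable (Spec_get_doc_alias filename out) := by unfold Spec_get_doc_alias; infer_instance

-- ===== CLAIM (what is proved, stated in full; the proofs are below) =====
def Claim_equal_get_doc_alias : Prop := ∀ (filename : String), Dom_get_doc_alias filename → Spec_get_doc_alias filename (get_doc_alias filename)

-- ===== LEMMAS AND PROOFS =====

def pvPA (c : Char) : Bool :=
  (decide ('a' ≤ c) && decide (c ≤ 'z')) || (decide ('0' ≤ c) && decide (c ≤ '9'))
def pvD (c : Char) : Bool := List.contains ['-'] c
def pvMach : List Char → Bool → List Char × Bool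
  | [], p => ([], p)
  | c :: t, p =>
    if pvPA c then ((pvMach t false).1.cons c, (pvMach t false).2)
    else if p then pvMach t p
    else ((pvMach t true).1.cons '-', (pvMach t true).2)
def pvCollect : List Char → List Char → List (List Char)
  | [], cur => if cur.isEmpty then [] else [cur.reverse]
  | c :: ys, cur =>
    if PySem.Chars.isspace c then
      (if cur.isEmpty then pvCollect ys [] else cur.reverse :: pvCollect ys [])
    else pvCollect ys (c :: cur)
def pvF (c : Char) : Char := if pvPA c then c else ' '
def pvRstripD (x : List Char) : List Char := (x.reverse.dropWhile pvD).reverse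

lemma pvD_dash : pvD '-' = true := rfl

lemma pvFoldl_step (s : List Char) (acc : List Char) (p : Bool) :
    s.foldl
      (fun (st : List Char × Bool) (ch : Char) =>
        if (decide ('a' ≤ ch) && decide (ch ≤ 'z')) || (decide ('0' ≤ ch) && decide (ch ≤ '9')) then
          (st.1 ++ [ch], false)
        else if st.2 then st
        else (st.1 ++ ['-'], true)) (acc, p)
    = (acc ++ (pvMach s p).1, (pvMach s p).2) := by
  induction s generalizing acc p with
  | nil => simp [pvMach]
  | cons c t ih =>
    rw [List.foldl_cons]
    have hcond : ((decide ('a' ≤ c) && decide (c ≤ 'z')) || (decide ('0' ≤ c) && decide (c ≤ '9'))) = pvPA c := rfl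
    rw [hcond]
    by_cases hc : pvPA c = true
    · simp only [pvMach, hc, if_pos]
      rw [ih]
      simp
    · simp only [Bool.not_eq_true] at hc
      simp only [pvMach, hc, Bool.false_eq_true, if_false]
      cases p with
      | true => simp only [if_true]; rw [ih]
      | false => simp only [Bool.false_eq_true, if_false]; rw [ih]; simp

lemma pvGo_eq (ys : List Char) : ∀ (cur : List Char) (acc : List (List Char)),
    PySem.Chars.split₀.go ys cur acc = acc.reverse ++ pvCollect ys cur := by
  induction ys with
  | nil =>
    intro cur acc
    rw [PySem.Chars.split₀.go]
    by_cases hc : cur.isEmpty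
    · simp [pvCollect, hc]
    · simp only [Bool.not_eq_true] at hc
      simp [pvCollect, hc]
  | cons c ys ih =>
    intro cur acc
    rw [PySem.Chars.split₀.go]
    by_cases hs : PySem.Chars.isspace c
    · by_cases hc : cur.isEmpty
      · simp [pvCollect, hs, hc, ih]
      · simp only [Bool.not_eq_true] at hc
        simp [pvCollect, hs, hc, ih]
    · simp only [Bool.not_eq_true] at hs
      simp [pvCollect, hs, ih]

lemma pvCollect_ne_nil : ∀ (ys cur : List Char), ∀ w ∈ pvCollect ys cur, w ≠ [] := by
  intro ys
  induction ys with
  | nil =>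
    intro cur w hw
    simp only [pvCollect] at hw
    split at hw
    · simp at hw
    · next hc =>
      simp only [List.mem_singleton] at hw
      subst hw
      intro h
      rw [List.reverse_eq_nil_iff] at h
      subst h
      simp at hc
  | cons c ys ih =>
    intro cur w hw
    simp only [pvCollect] at hw
    split at hw
    · split at hw
      · exact ih [] w hw
      · next hc =>
        rcases List.mem_cons.mp hw with rfl | hw
        · intro h
          rw [List.reverse_eq_nil_iff] at h
          subst h
          simp at hc
        · exact ih [] w hw
    · exact ih (c :: cur) w hw

lemma pvJoin_cons (sep w : List Char) (ws : List (List Char)) :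
    PySem.Chars.join sep (w :: ws) = w ++ (if ws.isEmpty then [] else sep ++ PySem.Chars.join sep ws) := by
  cases ws with
  | nil => simp [PySem.Chars.join, List.intercalate]
  | cons v ws => simp [PySem.Chars.join, List.intercalate, List.intersperse]

lemma pvRstripD_cons_nondash {c : Char} (h : pvD c = false) (x : List Char) :
    pvRstripD (c :: x) = c :: pvRstripD x := by
  unfold pvRstripD
  rw [List.reverse_cons, List.dropWhile_append]
  split
  · next he =>
    simp only [List.isEmpty_iff] at he
    simp [he, List.dropWhile, h]
  · simp

lemma pvRstripD_dash (x : List Char) :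
    pvRstripD ('-' :: x) = if (pvRstripD x).isEmpty then [] else '-' :: pvRstripD x := by
  unfold pvRstripD
  rw [List.reverse_cons, List.dropWhile_append]
  split
  · next he =>
    simp only [List.isEmpty_iff] at he
    simp [he, List.dropWhile, pvD_dash]
  · next he =>
    have hne : x.reverse.dropWhile pvD ≠ [] := by
      intro hh; rw [hh] at he; simp at he
    have : ((x.reverse.dropWhile pvD).reverse).isEmpty = false := by
      simp only [List.isEmpty_eq_false_iff, ne_eq, List.reverse_eq_nil_iff]
      exact hne
    rw [if_neg (by simp [this])]
    simp

lemma pvD_of_PA {c : Char} (h : pvPA c = true) : pvD c = false := by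
  rcases eq_or_ne c '-' with rfl | hne
  · simp [pvPA] at h
  · simp [pvD, hne]

lemma pvSpace_of_PA {c : Char} (h : pvPA c = true) : PySem.Chars.isspace c = false := by
  simp [pvPA, Char.le_def, UInt32.le_iff_toNat_le] at h
  simp only [PySem.Chars.isspace, Char.toNat, Bool.or_eq_false_iff, Bool.and_eq_false_iff,
    decide_eq_false_iff_not] at h ⊢
  omega

lemma pvDropWhile_mach (s : List Char) (p : Bool) :
    ((pvMach s p).1).dropWhile pvD = (pvMach s true).1 := by
  induction s generalizing p with
  | nil => simp [pvMach]
  | cons c t ih =>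
    by_cases hc : pvPA c = true
    · simp only [pvMach, hc, if_true, List.dropWhile_cons, pvD_of_PA hc]
      simp
    · simp only [Bool.not_eq_true] at hc
      cases p with
      | true => simp only [pvMach, hc, Bool.false_eq_true, if_false, if_true]; exact ih true
      | false =>
        simp only [pvMach, hc, Bool.false_eq_true, if_false, List.dropWhile_cons,
          pvD_dash]
        simpa using ih true

lemma pvStrip_eq (s : List Char) :
    PySem.Chars.stripChars (pvMach s false).1 ['-'] = pvRstripD (pvMach s true).1 := by
  show (List.dropWhile _ (List.dropWhile _ (pvMach s false).1).reverse).reverse = _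
  rw [show (List.dropWhile (fun c => ['-'].contains c) (pvMach s false).1) = (pvMach s false).1.dropWhile pvD from rfl]
  rw [pvDropWhile_mach]
  rfl

lemma pvMain (s : List Char) :
    (pvRstripD (pvMach s true).1 = PySem.Chars.join ['-'] (pvCollect (s.map pvF) [])) ∧
    (∀ cur : List Char, cur ≠ [] →
      PySem.Chars.join ['-'] (pvCollect (s.map pvF) cur) = cur.reverse ++ pvRstripD (pvMach s false).1) := by
  induction s with
  | nil =>
    constructor
    · simp [pvMach, pvRstripD, pvCollect]
    · intro cur hcur
      simp [pvMach, pvRstripD, pvCollect, List.isEmpty_eq_false_iff.mpr hcur, pvJoin_cons]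
  | cons c t ih =>
    have hspace : PySem.Chars.isspace ' ' = true := rfl
    constructor
    · by_cases hc : pvPA c = true
      · have h1 : pvF c = c := by simp [pvF, hc]
        simp only [List.map_cons, h1, pvCollect, pvSpace_of_PA hc, Bool.false_eq_true, if_false]
        rw [ih.2 [c] (by simp)]
        simp only [pvMach, hc, if_true]
        rw [pvRstripD_cons_nondash (pvD_of_PA hc)]
        simp
      · have h1 : pvF c = ' ' := by simp [pvF, hc]
        simp only [Bool.not_eq_true] at hc
        simp only [List.map_cons, h1, pvCollect, hspace, if_true, List.isEmpty_nil]
        simp only [pvMach, hc, Bool.false_eq_true, if_false, if_true]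
        exact ih.1
    · intro cur hcur
      by_cases hc : pvPA c = true
      · have h1 : pvF c = c := by simp [pvF, hc]
        simp only [List.map_cons, h1, pvCollect, pvSpace_of_PA hc, Bool.false_eq_true, if_false]
        rw [ih.2 (c :: cur) (by simp)]
        simp only [pvMach, hc, if_true]
        rw [pvRstripD_cons_nondash (pvD_of_PA hc)]
        simp
      · have h1 : pvF c = ' ' := by simp [pvF, hc]
        simp only [Bool.not_eq_true] at hc
        simp only [List.map_cons, h1, pvCollect, hspace, if_true,
          List.isEmpty_eq_false_iff.mpr hcur, Bool.false_eq_true, if_false]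
        simp only [pvMach, hc, Bool.false_eq_true, if_false]
        rw [pvRstripD_dash, pvJoin_cons, ih.1]
        cases hws : pvCollect (t.map pvF) [] with
        | nil => simp
        | cons w ws =>
          have hw : w ≠ [] := pvCollect_ne_nil (t.map pvF) [] w (by rw [hws]; simp)
          have hjoin : (PySem.Chars.join ['-'] (w :: ws)).isEmpty = false := by
            rw [pvJoin_cons]
            cases w with
            | nil => exact absurd rfl hw
            | cons a w' => simp
          simp [hjoin]

lemma pvUpperLower (c : Char) : PySem.Chars.isupper (PySem.Chars.lowerChar c) = false := by
  have hA : ('A' : Char).val.toNat = 65 := rfl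
  have hZ : ('Z' : Char).val.toNat = 90 := rfl
  have e : c.toNat = c.val.toNat := rfl
  unfold PySem.Chars.lowerChar
  split
  · next h =>
    simp only [PySem.Chars.isupper, Char.le_def, UInt32.le_iff_toNat_le, Bool.and_eq_true,
      decide_eq_true_eq, hA, hZ] at h
    have hvalid : (c.toNat + 32).isValidChar := Or.inl (by omega)
    have hv : (Char.ofNat (c.toNat + 32)).toNat = c.toNat + 32 := by
      rw [Char.toNat_ofNat]; simp [hvalid]
    have e2 : (Char.ofNat (c.toNat + 32)).toNat = (Char.ofNat (c.toNat + 32)).val.toNat := rfl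
    simp only [PySem.Chars.isupper, Char.le_def, UInt32.le_iff_toNat_le, Bool.and_eq_false_iff,
      decide_eq_false_iff_not, hA, hZ]
    right
    omega
  · next h =>
    simp only [PySem.Chars.isupper] at h ⊢
    simp only [Bool.and_eq_true, not_and_or, Bool.not_eq_true] at h
    rcases h with h | h <;> simp [h]

lemma pvIsalnum_lowerChar (c : Char) :
    PySem.Chars.isalnum (PySem.Chars.lowerChar c) = pvPA (PySem.Chars.lowerChar c) := by
  simp only [PySem.Chars.isalnum, PySem.Chars.isalpha, pvUpperLower, Bool.false_or, pvPA,
    PySem.Chars.islower, PySem.Chars.isdigit]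

lemma pvLowerSlice (fl : List Char) :
    PySem.Chars.lower (PySem.List.slice fl none (some (-4))) =
      PySem.List.slice (PySem.Chars.lower fl) none (some (-4)) := by
  rw [PySem.List.slice_to_neg_ofNat fl 4 (by omega), PySem.List.slice_to_neg_ofNat _ 4 (by omega)]
  simp [PySem.Chars.lower, List.map_take]

lemma pvBlank (u : List Char) :
    (PySem.Chars.lower u).map (fun ch => if PySem.Chars.isalnum ch then ch else ' ') =
      (PySem.Chars.lower u).map pvF := by
  simp only [PySem.Chars.lower, List.map_map]
  congr 1
  funext x
  simp only [Function.comp, pvIsalnum_lowerChar, pvF]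


-- ===== VERDICT (by name: the statement is the Claim_ definition above) =====
theorem get_doc_alias_spec : Claim_equal_get_doc_alias := by
  intro fn _
  unfold Spec_get_doc_alias get_doc_alias get_doc_alias_alt
  cases h1 : PySem.Dict.get? pvAliases fn with
  | some v => rfl
  | none =>
    cases h2 : List.find? (fun kv => PySem.Chars.lower kv.1.toList == PySem.Chars.lower fn.toList) pvAliases.items with
    | some kv => simp only [h2]
    | none =>
      simp only [h2]
      have hbase : PySem.Chars.lower (if PySem.Chars.endswith (PySem.Chars.lower fn.toList) ".pdf".toList = true then PySem.List.slice fn.toList none (some (-4)) else fn.toList)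
          = (if PySem.Chars.endswith (PySem.Chars.lower fn.toList) ".pdf".toList = true then PySem.List.slice (PySem.Chars.lower fn.toList) none (some (-4)) else PySem.Chars.lower fn.toList) := by
        split
        · exact pvLowerSlice fn.toList
        · rfl
      rw [← hbase, pvFoldl_step, pvBlank]
      simp only [List.nil_append]
      rw [pvStrip_eq, (pvMain (PySem.Chars.lower (if PySem.Chars.endswith (PySem.Chars.lower fn.toList) ".pdf".toList = true then PySem.List.slice fn.toList none (some (-4)) else fn.toList))).1]
      rw [show ∀ ys, PySem.Chars.split₀ ys = PySem.Chars.split₀.go ys [] [] from fun _ => rfl]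
      rw [pvGo_eq]
      simp
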